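-- pv_equiv track=rewrite | github.com/Keirua/aoc2020 | 5.py | find_col_id
-- ===== SOURCE A (Python) =====
-- def find_col_id(col_pass):
-- 	b = 0
-- 	u = 8
-- 	for c in col_pass:
-- 		n_half = (u - b) // 2
-- 		if c == "L":
-- 			u = u - n_half
-- 		else:
-- 			b = b + n_half
-- 	return b
-- ===== SOURCE B (Python) =====
-- def find_col_id(col_pass):
-- 	return sum((4 >> i) for i, c in enumerate(col_pass) if c != "L")
-- ===== Notes on version B (the rewrite author's own statement) =====
-- stated objective: idiomatic
-- what changed: Replaced the maintained lower/upper interval-narrowing loop with a one-line positional-weight sum: position i contributes weight 4 >> i whenever its character selects the upper half.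
import Mathlib
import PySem

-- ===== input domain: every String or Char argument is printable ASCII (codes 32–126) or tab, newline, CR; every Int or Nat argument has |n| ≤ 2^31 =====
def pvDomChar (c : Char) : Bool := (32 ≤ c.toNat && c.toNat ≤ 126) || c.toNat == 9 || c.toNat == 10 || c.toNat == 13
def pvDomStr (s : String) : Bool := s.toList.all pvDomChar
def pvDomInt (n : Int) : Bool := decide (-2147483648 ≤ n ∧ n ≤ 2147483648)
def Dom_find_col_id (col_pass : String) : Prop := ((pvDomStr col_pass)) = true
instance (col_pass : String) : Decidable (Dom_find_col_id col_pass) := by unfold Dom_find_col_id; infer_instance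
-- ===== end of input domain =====

-- B replaces A's maintained [b,u) interval with a direct positional-weight sum (idiomatic one-liner).

-- ===== PORT A =====
-- literal transliteration of A: loop over the characters with state (b, u)
def find_col_id (col_pass : String) : Int :=
  (col_pass.toList.foldl
    (fun (st : Int × Int) c =>
      let n_half := PySem.Int.floordiv (st.2 - st.1) 2
      if c = 'L' then (st.1, st.2 - n_half) else (st.1 + n_half, st.2))
    ((0 : Int), (8 : Int))).1

-- ===== PORT B =====
-- sum((4 >> i) for i, c in enumerate(col_pass) if c != "L")
-- (enumerate indices start at 0 so i ≥ 0; '.toNat' on the index is exact, and Nat '>>>' is Python's '>>' there)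
def find_col_id_alt (col_pass : String) : Int :=
  (PySem.List.enumerate col_pass.toList).foldl
    (fun (acc : Int) p => if p.2 ≠ 'L' then acc + ((4 >>> p.1.toNat : Nat) : Int) else acc) 0

-- ===== PRECONDITION & SPEC =====
def Spec_find_col_id (col_pass : String) (out : Int) : Prop := out = find_col_id_alt col_pass
instance (col_pass : String) (out : Int) : Decidable (Spec_find_col_id col_pass out) := by unfold Spec_find_col_id; infer_instance

-- ===== CLAIM (what is proved, stated in full; the proofs are below) =====
def Claim_equal_find_col_id : Prop := ∀ (col_pass : String), Dom_find_col_id col_pass → Spec_find_col_id col_pass (find_col_id col_pass)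

-- ===== LEMMAS AND PROOFS =====

-- width of A's interval after i loop steps: 8, 4, 2, then 1 forever
def pvW (i : Nat) : Int := if i = 0 then 8 else if i = 1 then 4 else if i = 2 then 2 else 1

theorem pvShift_ge3 (n : Nat) : (4 >>> (n + 3)) = 0 := by
  have h : 4 < 2 ^ (n + 3) := by
    calc 4 < 8 := by norm_num
    _ = 2 ^ 3 := by norm_num
    _ ≤ 2 ^ (n + 3) := Nat.pow_le_pow_right (by norm_num) (by omega)
  simp [Nat.shiftRight_eq_div_pow, Nat.div_eq_of_lt h]

-- the half taken by A at step i is exactly B's weight 4 >> i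
theorem pvHalf (i : Nat) : PySem.Int.floordiv (pvW i) 2 = ((4 >>> i : Nat) : Int) := by
  match i with
  | 0 => decide
  | 1 => decide
  | 2 => decide
  | n + 3 => simp [pvW, pvShift_ge3 n]

-- and the remaining width is the next width
theorem pvWidth_succ (i : Nat) : pvW i - PySem.Int.floordiv (pvW i) 2 = pvW (i + 1) := by
  match i with
  | 0 => decide
  | 1 => decide
  | 2 => decide
  | n + 3 => simp [pvW]

theorem pvMain (l : List Char) (b : Int) (i : Nat) :
    (l.foldl
      (fun (st : Int × Int) c =>
        let n_half := PySem.Int.floordiv (st.2 - st.1) 2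
        if c = 'L' then (st.1, st.2 - n_half) else (st.1 + n_half, st.2))
      (b, b + pvW i)).1
    = (PySem.List.enumerate l (i : Int)).foldl
        (fun (acc : Int) p => if p.2 ≠ 'L' then acc + ((4 >>> p.1.toNat : Nat) : Int) else acc) b := by
  induction l generalizing b i with
  | nil => simp [PySem.List.enumerate_nil]
  | cons c t ih =>
    rw [PySem.List.enumerate_cons]
    simp only [List.foldl_cons, add_sub_cancel_left]
    by_cases hc : c = 'L'
    · rw [if_pos hc, if_neg (by simp [hc])]
      rw [add_sub_assoc, pvWidth_succ i, show ((i : Int) + 1) = ((i + 1 : Nat) : Int) by push_cast; ring]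
      exact ih b (i + 1)
    · rw [if_neg hc, if_pos (by simp [hc])]
      rw [pvHalf i, show ((i : Int)).toNat = i from Int.toNat_natCast i]
      have harr : b + pvW i = (b + ((4 >>> i : Nat) : Int)) + pvW (i + 1) := by
        rw [← pvHalf i]
        have := pvWidth_succ i
        omega
      rw [harr, show ((i : Int) + 1) = ((i + 1 : Nat) : Int) by push_cast; ring]
      exact ih (b + ((4 >>> i : Nat) : Int)) (i + 1)

-- ===== VERDICT (by name: the statement is the Claim_ definition above) =====
theorem find_col_id_spec : Claim_equal_find_col_id := by
  intro s _
  show find_col_id s = find_col_id_alt s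
  have := pvMain s.toList 0 0
  simpa [find_col_id, find_col_id_alt, pvW] using this
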